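-- pv_equiv track=rewrite | github.com/scout719/adventOfCode | 2016/day7.py | day7_parse
-- ===== SOURCE A (Python) =====
-- def day7_parse(data: list[str]):
--     ips = []
--     for line in data:
--         curr = ""
--         outside, inside = [], []
--         for _, c in enumerate(line):
--             if c == "]":
--                 inside.append(curr)
--                 curr = ""
--             elif c == "[":
--                 outside.append(curr)
--                 curr = ""
--             else:
--                 curr += c
--         outside.append(curr)
--         ips.append((outside, inside))
--
--     return ips
-- ===== SOURCE B (Python) =====
-- def day7_parse(data: list[str]):
--     ips = []
--     for line in data:
--         outside, inside = [], []
--         for chunk in line.split('['):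
--             parts = chunk.split(']')
--             inside.extend(parts[:-1])
--             outside.append(parts[-1])
--         ips.append((outside, inside))
--     return ips
-- ===== Notes on version B (the rewrite author's own statement) =====
-- stated objective: simpler
-- what changed: Replaces the per-character accumulator state machine with str.split on '[' and ']': segments before ']' go to inside, the last segment of each '['-chunk goes to outside.
import Mathlib
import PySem

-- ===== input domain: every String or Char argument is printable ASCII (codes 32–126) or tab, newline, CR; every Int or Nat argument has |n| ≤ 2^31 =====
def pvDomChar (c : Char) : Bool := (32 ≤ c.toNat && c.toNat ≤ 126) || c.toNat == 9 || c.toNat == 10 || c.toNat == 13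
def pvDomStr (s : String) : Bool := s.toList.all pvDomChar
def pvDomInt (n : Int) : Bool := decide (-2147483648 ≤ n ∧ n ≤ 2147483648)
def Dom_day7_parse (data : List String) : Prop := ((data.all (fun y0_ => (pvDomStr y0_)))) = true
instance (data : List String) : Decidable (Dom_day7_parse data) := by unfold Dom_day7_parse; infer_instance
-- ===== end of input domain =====

-- B replaces A's per-character accumulator state machine by str.split on '[' and ']' (objective: simpler).


-- ===== PORT A =====
-- one step of A's inner character loop; state = (curr, outside, inside)
def day7A_step (st : List Char × List String × List String) (c : Char) :
    List Char × List String × List String :=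
  if c = ']' then ([], st.2.1, st.2.2 ++ [String.ofList st.1])
  else if c = '[' then ([], st.2.1 ++ [String.ofList st.1], st.2.2)
  else (st.1 ++ [c], st.2.1, st.2.2)

def day7A_line (line : String) : List String × List String :=
  let st := line.toList.foldl day7A_step ([], [], [])
  (st.2.1 ++ [String.ofList st.1], st.2.2)

def day7_parse (data : List String) : List (List String × List String) :=
  data.foldl (fun ips line => ips ++ [day7A_line line]) []

-- ===== PORT B =====
-- one step of B's chunk loop: chunk.split(']'): all but the last go to inside, the last to outside
def day7B_step (acc : List String × List String) (chunk : List Char) :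
    List String × List String :=
  let parts := chunk.splitOn ']'
  (acc.1 ++ [String.ofList (parts.getLastD [])], acc.2 ++ parts.dropLast.map String.ofList)

def day7B_line (line : String) : List String × List String :=
  (line.toList.splitOn '[').foldl day7B_step ([], [])

def day7_parse_alt (data : List String) : List (List String × List String) :=
  data.foldl (fun ips line => ips ++ [day7B_line line]) []

-- ===== PRECONDITION & SPEC =====
def Spec_day7_parse (data : List String) (out : List (List String × List String)) : Prop := out = day7_parse_alt data
instance (data : List String) (out : List (List String × List String)) : Decidable (Spec_day7_parse data out) := by unfold Spec_day7_parse; infer_instance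

-- ===== CLAIM (what is proved, stated in full; the proofs are below) =====
def Claim_equal_day7_parse : Prop := ∀ (data : List String), Dom_day7_parse data → Spec_day7_parse data (day7_parse data)

-- ===== LEMMAS AND PROOFS =====

-- what B produces per chunk
def pvLastPart (ch : List Char) : String := String.ofList ((ch.splitOn ']').getLastD [])
def pvPreParts (ch : List Char) : List String := (ch.splitOn ']').dropLast.map String.ofList

theorem day7B_fold (chunks : List (List Char)) (o i : List String) :
    chunks.foldl day7B_step (o, i) =
      (o ++ chunks.map pvLastPart, i ++ chunks.flatMap pvPreParts) := by
  induction chunks generalizing o i with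
  | nil => simp
  | cons ch t ih =>
      simp only [List.foldl_cons, day7B_step, ih, List.map_cons, List.flatMap_cons]
      simp [pvLastPart, pvPreParts]

theorem splitOn_no_sep (a : Char) (xs : List Char) (h : a ∉ xs) : xs.splitOn a = [xs] := by
  simp only [List.splitOn]
  refine List.splitOnP_eq_single _ _ ?_
  intro x hx
  simp only [beq_iff_eq]
  exact fun he => h (he ▸ hx)

theorem splitOn_sep_append (a : Char) (xs ys : List Char) (h : a ∉ xs) :
    (xs ++ a :: ys).splitOn a = xs :: ys.splitOn a := by
  simp only [List.splitOn]
  refine List.splitOnP_first _ _ ?_ a (by simp) ys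
  intro x hx
  simp only [beq_iff_eq]
  exact fun he => h (he ▸ hx)

theorem splitOn_ne_nil (a : Char) (xs : List Char) : xs.splitOn a ≠ [] :=
  List.splitOnP_ne_nil _ xs

theorem splitOn_append_no_sep (a : Char) (xs ys : List Char) (h : a ∉ xs) :
    (xs ++ ys).splitOn a = (ys.splitOn a).modifyHead (xs ++ ·) := by
  induction xs with
  | nil =>
      cases hys : ys.splitOn a with
      | nil => exact absurd hys (splitOn_ne_nil a ys)
      | cons p t => simp [hys]
  | cons x xs ih =>
      have hx : x ≠ a := by intro he; exact h (by simp [he])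
      have hxs : a ∉ xs := fun hm => h (List.mem_cons_of_mem _ hm)
      have hcons : ((x :: (xs ++ ys)).splitOnP (· == a)) =
          ((xs ++ ys).splitOnP (· == a)).modifyHead (List.cons x) := by
        rw [List.splitOnP_cons]
        simp [hx]
      have := ih hxs
      simp only [List.splitOn] at this ⊢
      rw [List.cons_append, hcons, this]
      cases hys : ys.splitOnP (· == a) with
      | nil => exact absurd hys (splitOn_ne_nil a ys)
      | cons p t => simp

-- A's loop from state (curr, out, ins) equals B's split-based description of curr ++ cs
theorem day7A_fold (cs : List Char) : ∀ (curr : List Char) (o i : List String),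
    '[' ∉ curr → ']' ∉ curr →
    (let st := cs.foldl day7A_step (curr, o, i)
     (st.2.1 ++ [String.ofList st.1], st.2.2)) =
      (o ++ ((curr ++ cs).splitOn '[').map pvLastPart,
       i ++ ((curr ++ cs).splitOn '[').flatMap pvPreParts) := by
  induction cs with
  | nil =>
      intro curr o i h1 h2
      rw [List.append_nil, splitOn_no_sep _ _ h1]
      simp [pvLastPart, pvPreParts, splitOn_no_sep _ _ h2]
  | cons c cs ih =>
      intro curr o i h1 h2
      by_cases hc1 : c = ']'
      · subst hc1
        have : (curr ++ ']' :: cs).splitOn '[' =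
            ((cs.splitOn '[').modifyHead ((curr ++ [']']) ++ ·)) := by
          have h3 : '[' ∉ curr ++ [']'] := by
            intro hm; rcases List.mem_append.1 hm with hm | hm
            · exact h1 hm
            · simp at hm
          simpa using splitOn_append_no_sep '[' (curr ++ [']']) cs h3
        rw [this]
        cases hcs : cs.splitOn '[' with
        | nil => exact absurd hcs (splitOn_ne_nil _ _)
        | cons p t =>
            have key1 : pvLastPart (curr ++ ']' :: p) = pvLastPart p := by
              unfold pvLastPart
              rw [splitOn_sep_append ']' curr p h2]
              cases hp : p.splitOn ']' with
              | nil => exact absurd hp (splitOn_ne_nil _ _)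
              | cons q u => simp
            have key2 : pvPreParts (curr ++ ']' :: p) = String.ofList curr :: pvPreParts p := by
              unfold pvPreParts
              rw [splitOn_sep_append ']' curr p h2]
              cases hp : p.splitOn ']' with
              | nil => exact absurd hp (splitOn_ne_nil _ _)
              | cons q u => simp
            have := ih [] o (i ++ [String.ofList curr]) (by simp) (by simp)
            simp only [List.nil_append] at this
            have hstep : day7A_step (curr, o, i) ']' = ([], o, i ++ [String.ofList curr]) := by
              simp [day7A_step]
            simp only [List.foldl_cons, hstep]
            rw [this, hcs]
            simp only [List.modifyHead_cons, List.map_cons, List.flatMap_cons]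
            simp
            exact ⟨key1.symm, by simp [key2]⟩
      · by_cases hc2 : c = '['
        · subst hc2
          have : (curr ++ '[' :: cs).splitOn '[' = curr :: cs.splitOn '[' :=
            splitOn_sep_append '[' curr cs h1
          rw [this]
          have := ih [] (o ++ [String.ofList curr]) i (by simp) (by simp)
          simp only [List.nil_append] at this
          have hstep : day7A_step (curr, o, i) '[' = ([], o ++ [String.ofList curr], i) := by
            simp [day7A_step]
          simp only [List.foldl_cons, hstep]
          rw [this]
          have keyL : pvLastPart curr = String.ofList curr := by
            unfold pvLastPart; rw [splitOn_no_sep _ _ h2]; simp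
          have keyP : pvPreParts curr = [] := by
            unfold pvPreParts; rw [splitOn_no_sep _ _ h2]; simp
          simp [keyL, keyP]
        · have h1' : '[' ∉ curr ++ [c] := by
            intro hm; rcases List.mem_append.1 hm with hm | hm
            · exact h1 hm
            · simp at hm; exact hc2 hm.symm
          have h2' : ']' ∉ curr ++ [c] := by
            intro hm; rcases List.mem_append.1 hm with hm | hm
            · exact h2 hm
            · simp at hm; exact hc1 hm.symm
          have := ih (curr ++ [c]) o i h1' h2'
          have hstep : day7A_step (curr, o, i) c = (curr ++ [c], o, i) := by
            simp [day7A_step, hc1, hc2]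
          simp only [List.foldl_cons, hstep]
          rw [this]
          simp

theorem day7_line_eq (line : String) : day7A_line line = day7B_line line := by
  unfold day7A_line day7B_line
  rw [day7B_fold]
  have := day7A_fold line.toList [] [] [] (by simp) (by simp)
  simpa using this

-- ===== VERDICT (by name: the statement is the Claim_ definition above) =====
theorem day7_parse_spec : Claim_equal_day7_parse := by
  intro data _
  unfold Spec_day7_parse day7_parse day7_parse_alt
  induction data using List.reverseRecOn with
  | nil => rfl
  | append_singleton xs x ih => simp only [day7_line_eq, List.foldl_append, List.foldl_cons, List.foldl_nil]
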